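-- pv_equiv track=rewrite | github.com/aakashsohani/Ducci-Sequence | Ducci_sequence.py | ducci_sequence
-- ===== SOURCE A (Python) =====
-- def ducci_sequence(test_list,n):
--     temp_list=[]
--     for i in range(0,len(test_list)):
--         if i == 3:
--             temp_list.append(abs(test_list[0]-test_list[3]))
--         else:
--             j = abs(test_list[i]-test_list[i+1])
--             temp_list.append(j)
--
--     if n == 0:
--         return temp_list
--     else:
--         final_list = ducci_sequence(temp_list,n-1)
--     return final_list
-- ===== SOURCE B (Python) =====
-- def ducci_sequence(test_list, n):
--     cur = list(test_list)
--     for _ in range(n + 1):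
--         cur = [abs(cur[0] - cur[3]) if i == 3 else abs(cur[i] - cur[i + 1])
--                for i in range(len(cur))]
--     return cur
-- ===== Notes on version B (the rewrite author's own statement) =====
-- stated objective: simpler
-- what changed: Replaced A's recursion (one step, then recurse with n-1 until n==0) by a single iterative loop running the identical per-index step exactly n+1 times and reassigning the current list; no recursion, no special return plumbing.
import Mathlib
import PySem

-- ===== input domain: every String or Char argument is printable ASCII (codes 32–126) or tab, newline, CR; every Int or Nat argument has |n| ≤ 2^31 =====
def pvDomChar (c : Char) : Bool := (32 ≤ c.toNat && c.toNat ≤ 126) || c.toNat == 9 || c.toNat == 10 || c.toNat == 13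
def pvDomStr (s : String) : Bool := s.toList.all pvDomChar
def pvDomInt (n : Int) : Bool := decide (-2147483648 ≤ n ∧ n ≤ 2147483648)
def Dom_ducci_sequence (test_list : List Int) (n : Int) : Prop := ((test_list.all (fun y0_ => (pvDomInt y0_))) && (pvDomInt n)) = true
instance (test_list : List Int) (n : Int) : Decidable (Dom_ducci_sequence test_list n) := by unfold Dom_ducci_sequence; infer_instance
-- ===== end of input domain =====

-- B replaces A's recursion by an iterative loop running the same per-index step n+1 times;
-- equivalence is about the return value (A copies into a fresh list, no argument mutation).


-- ===== PORT A =====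
-- one pass of A's loop: for i in range(len(test_list)): append abs-difference (i == 3 wraps to index 0)
-- pyGetD 0 stands for test_list[…]: in range under Pre_ (length 0 or 4); out-of-range = IndexError is excluded by Pre_
def ducciStepA (test_list : List Int) : List Int :=
  (List.range test_list.length).foldl
    (fun (temp_list : List Int) (i : Nat) =>
      if i = 3 then
        temp_list ++ [|PySem.List.pyGetD test_list 0 0 - PySem.List.pyGetD test_list 3 0|]
      else
        temp_list ++ [|PySem.List.pyGetD test_list (i : Int) 0 - PySem.List.pyGetD test_list ((i : Int) + 1) 0|])
    []

-- A's recursion on n; fuel n.toNat (for n < 0 A never returns — excluded by Pre_)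
def ducciRecA (test_list : List Int) : Nat → List Int
  | 0 => ducciStepA test_list
  | k + 1 => ducciRecA (ducciStepA test_list) k

def ducci_sequence (test_list : List Int) (n : Int) : List Int :=
  ducciRecA test_list n.toNat

-- ===== PORT B =====
-- B's comprehension: [abs(cur[0]-cur[3]) if i==3 else abs(cur[i]-cur[i+1]) for i in range(len(cur))]
def ducciStepB (cur : List Int) : List Int :=
  (List.range cur.length).map
    (fun (i : Nat) =>
      if i = 3 then |PySem.List.pyGetD cur 0 0 - PySem.List.pyGetD cur 3 0|
      else |PySem.List.pyGetD cur (i : Int) 0 - PySem.List.pyGetD cur ((i : Int) + 1) 0|)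

-- for _ in range(n+1): cur = step(cur)
def ducci_sequence_alt (test_list : List Int) (n : Int) : List Int :=
  (List.range (n + 1).toNat).foldl (fun cur _ => ducciStepB cur) test_list

-- ===== PRECONDITION & SPEC =====
-- Pre_ excludes exactly the inputs on which A raises: any list length other than 0 or 4
-- (IndexError at test_list[i+1] / test_list[3]) and n < 0 (unbounded recursion, RecursionError).
def Pre_ducci_sequence (test_list : List Int) (n : Int) : Prop :=
  (test_list.length = 0 ∨ test_list.length = 4) ∧ 0 ≤ n
instance (test_list : List Int) (n : Int) : Decidable (Pre_ducci_sequence test_list n) := by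
  unfold Pre_ducci_sequence; infer_instance

def pvWitness_ducci_sequence : List Int × Int := ([1, 2, 3, 4], 2)

def Spec_ducci_sequence (test_list : List Int) (n : Int) (out : List Int) : Prop := out = ducci_sequence_alt test_list n
instance (test_list : List Int) (n : Int) (out : List Int) : Decidable (Spec_ducci_sequence test_list n out) := by unfold Spec_ducci_sequence; infer_instance

-- ===== CLAIM (what is proved, stated in full; the proofs are below) =====
def Claim_equal_ducci_sequence : Prop := ∀ (test_list : List Int) (n : Int), Dom_ducci_sequence test_list n → Pre_ducci_sequence test_list n → Spec_ducci_sequence test_list n (ducci_sequence test_list n)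


-- ===== LEMMAS AND PROOFS =====

-- A's append-accumulating pass computes B's comprehension
theorem ducciStepA_eq_B (l : List Int) : ducciStepA l = ducciStepB l := by
  unfold ducciStepA ducciStepB
  have h : (fun (temp_list : List Int) (i : Nat) =>
      if i = 3 then
        temp_list ++ [|PySem.List.pyGetD l 0 0 - PySem.List.pyGetD l 3 0|]
      else
        temp_list ++ [|PySem.List.pyGetD l (i : Int) 0 - PySem.List.pyGetD l ((i : Int) + 1) 0|])
      = (fun (temp_list : List Int) (i : Nat) => temp_list ++
          [if i = 3 then |PySem.List.pyGetD l 0 0 - PySem.List.pyGetD l 3 0|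
           else |PySem.List.pyGetD l (i : Int) 0 - PySem.List.pyGetD l ((i : Int) + 1) 0|]) := by
    funext t i; split <;> rfl
  rw [h, PySem.List.foldl_append_singleton_eq_map]
  rfl

-- A's recursion is k+1 applications of the step
theorem ducciRecA_eq_iterate (k : Nat) (l : List Int) :
    ducciRecA l k = ducciStepB^[k + 1] l := by
  induction k generalizing l with
  | zero => simp [ducciRecA, ducciStepA_eq_B]
  | succ m ih =>
      rw [ducciRecA, ih, ducciStepA_eq_B, ← Function.iterate_succ_apply]

-- B's fold over range(m) ignoring the counter is m applications of the step
theorem foldl_range_iterate (m : Nat) (l : List Int) :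
    (List.range m).foldl (fun cur _ => ducciStepB cur) l = ducciStepB^[m] l := by
  induction m generalizing l with
  | zero => rfl
  | succ k ih =>
      rw [List.range_succ, List.foldl_append, List.foldl_cons, List.foldl_nil,
        Function.iterate_succ_apply']
      -- both sides are step applied after k folds / iterates
      rw [ih]

-- ===== VERDICT (by name: the statement is the Claim_ definition above) =====
theorem ducci_sequence_spec : Claim_equal_ducci_sequence := by
  intro test_list n _ hpre
  unfold Spec_ducci_sequence ducci_sequence ducci_sequence_alt
  rw [ducciRecA_eq_iterate, foldl_range_iterate]
  obtain ⟨_, hn⟩ := hpre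
  have : (n + 1).toNat = n.toNat + 1 := by omega
  rw [this]
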